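-- pv_equiv track=rewrite | github.com/bmfischer3/list-tracker | api/index.py | is_valid_dynamodb_name
-- ===== SOURCE A (Python) =====
-- def is_valid_dynamodb_name(name: str) -> bool:
--     """Check if the provided string meets DynamoDB naming rules.
--
--     Args:
--         name (str): The name to validate.
--
--     Returns:
--         bool: True if the name is valid, False otherwise.
--     """
--     if not (3 <= len(name) <= 255):
--         return False
--
--     allowed_characters = set("abcdefghijklmnopqrstuvwxyzABCDEFGHIJKLMNOPQRSTUVWXYZ0123456789_-.")
--
--     for char in name:
--         if char not in allowed_characters:
--             return False
--
--     return True
-- ===== SOURCE B (Python) =====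
-- import re
--
-- _NAME_RE = re.compile(r'[A-Za-z0-9_.\-]{3,255}')
--
-- def is_valid_dynamodb_name(name: str) -> bool:
--     """Check if the provided string meets DynamoDB naming rules."""
--     return _NAME_RE.fullmatch(name) is not None
-- ===== Notes on version B (the rewrite author's own statement) =====
-- stated objective: idiomatic
-- what changed: The length guard and explicit per-character membership loop over a hand-built allowed set are replaced by a single anchored regular-expression match, re.fullmatch(r'[A-Za-z0-9_.\-]{3,255}', name), whose quantifier enforces the length bound and whose character class is exactly the allowed set.
import Mathlib
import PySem

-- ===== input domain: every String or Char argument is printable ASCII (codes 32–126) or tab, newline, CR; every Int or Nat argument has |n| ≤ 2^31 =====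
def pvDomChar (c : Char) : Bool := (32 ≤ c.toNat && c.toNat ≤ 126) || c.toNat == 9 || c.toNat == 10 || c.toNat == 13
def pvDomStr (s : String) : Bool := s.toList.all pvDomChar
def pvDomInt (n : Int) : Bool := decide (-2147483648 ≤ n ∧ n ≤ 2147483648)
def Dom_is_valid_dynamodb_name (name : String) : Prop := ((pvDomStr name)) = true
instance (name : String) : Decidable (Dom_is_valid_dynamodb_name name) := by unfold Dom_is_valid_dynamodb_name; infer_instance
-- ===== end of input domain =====

-- B replaces A's length guard plus character loop with a single regular-expression
-- fullmatch of '[A-Za-z0-9_.\-]{3,255}' (objective: idiomatic); same return value on all inputs.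


-- ===== PORT A =====
-- allowed_characters = set("…")
def pvAllowedA : PySem.Set Char :=
  PySem.Set.ofList "abcdefghijklmnopqrstuvwxyzABCDEFGHIJKLMNOPQRSTUVWXYZ0123456789_-.".toList

-- 'for char in name: if char not in allowed_characters: return False' / 'return True'
def pvLoopA : List Char → Bool
  | [] => true
  | c :: rest => if ¬ PySem.Set.contains pvAllowedA c then false else pvLoopA rest

def is_valid_dynamodb_name (name : String) : Bool :=
  if ¬ (3 ≤ PySem.Str.len name ∧ PySem.Str.len name ≤ 255) then false
  else pvLoopA name.toList

-- ===== PORT B =====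
-- Source B: return _NAME_RE.fullmatch(name) is not None, with _NAME_RE = re.compile(r'[A-Za-z0-9_.\-]{3,255}').
-- No regex engine exists in Lean; the library call is ported by hand, exact for THIS literal pattern:
-- fullmatch succeeds iff every character is in the class [A-Za-z0-9_.-] and the length is between 3 and 255.
def pvClassB (c : Char) : Bool :=
  ('A' ≤ c && c ≤ 'Z') || ('a' ≤ c && c ≤ 'z') || ('0' ≤ c && c ≤ '9')
    || c == '_' || c == '.' || c == '-'

def is_valid_dynamodb_name_alt (name : String) : Bool :=
  decide (3 ≤ PySem.Str.len name ∧ PySem.Str.len name ≤ 255) && name.toList.all pvClassB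

-- ===== PRECONDITION & SPEC =====
def Spec_is_valid_dynamodb_name (name : String) (out : Bool) : Prop := out = is_valid_dynamodb_name_alt name
instance (name : String) (out : Bool) : Decidable (Spec_is_valid_dynamodb_name name out) := by unfold Spec_is_valid_dynamodb_name; infer_instance

-- ===== CLAIM (what is proved, stated in full; the proofs are below) =====
def Claim_equal_is_valid_dynamodb_name : Prop := ∀ (name : String), Dom_is_valid_dynamodb_name name → Spec_is_valid_dynamodb_name name (is_valid_dynamodb_name name)

-- ===== LEMMAS AND PROOFS =====

-- On every character below code point 128, membership in A's allowed set agrees with B's class test.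
set_option maxRecDepth 8192 in
theorem pv_contains_eq_class (n : Nat) (h : n < 128) :
    PySem.Set.contains pvAllowedA (Char.ofNat n) = pvClassB (Char.ofNat n) := by
  revert h; revert n; decide

theorem pv_contains_eq_class' (c : Char) (h : c.toNat < 128) :
    PySem.Set.contains pvAllowedA c = pvClassB c := by
  have := pv_contains_eq_class c.toNat h
  rwa [Char.ofNat_toNat] at this

-- A's early-return character loop equals B's 'every char in class' on domain characters.
theorem pv_loopA_eq_all (cs : List Char) (h : cs.all pvDomChar = true) :
    pvLoopA cs = cs.all pvClassB := by
  induction cs with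
  | nil => rfl
  | cons c rest ih =>
      simp only [List.all_cons, Bool.and_eq_true] at h
      have hc : c.toNat < 128 := by
        have := h.1; simp [pvDomChar] at this; omega
      simp only [pvLoopA, List.all_cons, pv_contains_eq_class' c hc]
      by_cases hcls : pvClassB c = true
      · simp [hcls, ih h.2]
      · simp [Bool.not_eq_true] at hcls; simp [hcls]

-- ===== VERDICT (by name: the statement is the Claim_ definition above) =====
theorem is_valid_dynamodb_name_spec : Claim_equal_is_valid_dynamodb_name := by
  intro name hdom
  unfold Spec_is_valid_dynamodb_name is_valid_dynamodb_name is_valid_dynamodb_name_alt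
  rw [pv_loopA_eq_all name.toList hdom]
  have hdn : ∀ n : Nat, (!decide (255 < n)) = decide (n ≤ 255) := by
    intro n; by_cases h : 255 < n <;> simp [h]; omega
  simp [hdn]
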